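-- pv_equiv track=rewrite | github.com/manas-17045/LeetcodeSolutions | Leetcode 1801-1900/1814/1814-1.py | countNicePairs
-- ===== SOURCE A (Python) =====
-- from collections import defaultdict
--
-- def countNicePairs(nums: list[int]) -> int:
--     """
--     Counts the number of "nice" pairs in the given array.
--     A pair (i, j) is considered nice if nums[i] + rev(nums[j]) == nums[j] + rev(nums[i]),
--     which simplifies to nums[i] - rev(nums[i]) == nums[j] - rev(nums[j]).
--     :param nums: A list of integers.
--     :return: The number of nice pairs modulo 10^9 + 7.
--     """
--     def rev(n: int) -> int:
--         return int(str(n)[::-1])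
--
--     freqMap = defaultdict(int)
--     nicePairsCount = 0
--     mod = 10 ** 9 + 7
--
--     for num in nums:
--         diff = num - rev(num)
--         nicePairsCount = (nicePairsCount + freqMap[diff]) % mod
--         freqMap[diff] += 1
--
--     return nicePairsCount
-- ===== SOURCE B (Python) =====
-- from collections import Counter
--
-- def countNicePairs(nums: list[int]) -> int:
--     def rev(n: int) -> int:
--         return int(str(n)[::-1])
--
--     counts = Counter(num - rev(num) for num in nums)
--     total = sum(c * (c - 1) // 2 for c in counts.values())
--     return total % (10 ** 9 + 7)
-- ===== Notes on version B (the rewrite author's own statement) =====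
-- stated objective: simpler
-- what changed: B tallies all num-rev(num) differences with one Counter and sums c*(c-1)//2 over the group sizes with a single final modulo, instead of A's running pair count that adds the current frequency and reduces mod at every element.
import Mathlib
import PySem

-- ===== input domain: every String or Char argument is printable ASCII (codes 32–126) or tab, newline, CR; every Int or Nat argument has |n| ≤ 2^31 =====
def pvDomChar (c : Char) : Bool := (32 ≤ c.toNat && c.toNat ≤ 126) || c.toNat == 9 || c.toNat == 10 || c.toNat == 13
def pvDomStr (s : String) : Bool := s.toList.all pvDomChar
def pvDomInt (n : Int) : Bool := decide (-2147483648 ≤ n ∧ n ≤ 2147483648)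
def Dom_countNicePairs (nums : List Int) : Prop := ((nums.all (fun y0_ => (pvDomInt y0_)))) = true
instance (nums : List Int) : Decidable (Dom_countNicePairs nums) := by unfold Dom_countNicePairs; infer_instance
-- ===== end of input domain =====

-- B replaces A's running, per-step-reduced pair count by a Counter of the diffs and one
-- closed-form sum of c*(c-1)//2 per group, with a single final modulo (objective: simpler).

-- ===== PORT A =====
-- rev(n) = int(str(n)[::-1]); exact for n ≥ 0 (ofChars? is none exactly where Python's int() raises,
-- i.e. for negative n; those inputs are excluded by Pre_ and .getD 0 is never reached on Pre_).
def pyRev (n : Int) : Int :=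
  (PySem.Int.ofChars? ((PySem.Int.toChars n).reverse)).getD 0

def countNicePairs (nums : List Int) : Int :=
  (nums.foldl
    (fun (s : PySem.Dict Int Int × Int) num =>
      let diff := num - pyRev num
      (s.1.modify diff 0 (· + 1),
       PySem.Int.mod (s.2 + s.1.getD diff 0) (10 ^ 9 + 7)))
    (PySem.Dict.empty, 0)).2

-- ===== PORT B =====
def countNicePairs_alt (nums : List Int) : Int :=
  let counts := PySem.Dict.counter (nums.map (fun num => num - pyRev num))
  let total := (counts.values.map (fun c => PySem.Int.floordiv (c * (c - 1)) 2)).sum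
  PySem.Int.mod total (10 ^ 9 + 7)

-- ===== PRECONDITION & SPEC =====
-- Pre_ excludes exactly the inputs containing a negative number, on which Python's
-- int(str(n)[::-1]) raises ValueError (the reversed string ends in '-') in both A and B.
def Pre_countNicePairs (nums : List Int) : Prop := ∀ n ∈ nums, 0 ≤ n
instance (nums : List Int) : Decidable (Pre_countNicePairs nums) := by
  unfold Pre_countNicePairs; infer_instance
def pvWitness_countNicePairs : List Int := [42, 11, 1, 97, 0, 10]

def Spec_countNicePairs (nums : List Int) (out : Int) : Prop := out = countNicePairs_alt nums
instance (nums : List Int) (out : Int) : Decidable (Spec_countNicePairs nums out) := by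
  unfold Spec_countNicePairs; infer_instance

-- ===== CLAIM (what is proved, stated in full; the proofs are below) =====
def Claim_equal_countNicePairs : Prop :=
  ∀ (nums : List Int), Dom_countNicePairs nums → Pre_countNicePairs nums →
    Spec_countNicePairs nums (countNicePairs nums)

-- ===== LEMMAS AND PROOFS =====

-- pvQ l = number of (unordered) equal pairs in l, counted as "later equal elements".
def pvQ : List Int → Int
  | [] => 0
  | x :: t => (t.count x : Int) + pvQ t

-- A's per-element step, over the precomputed diff.
def pvStep (s : PySem.Dict Int Int × Int) (diff : Int) : PySem.Dict Int Int × Int :=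
  (s.1.modify diff 0 (· + 1),
   PySem.Int.mod (s.2 + s.1.getD diff 0) (10 ^ 9 + 7))

theorem pv_sum_getD_modify (t : List Int) (d : PySem.Dict Int Int) (x : Int) :
    (t.map (fun k => (d.modify x 0 (· + 1)).getD k 0)).sum
      = (t.map (fun k => d.getD k 0)).sum + (t.count x : Int) := by
  induction t with
  | nil => simp
  | cons y t ih =>
    by_cases h : y = x
    · subst h
      simp [PySem.Dict.getD_modify_self, List.count_cons_self, ih]
      ring
    · rw [List.count_cons_of_ne h]
      simp [PySem.Dict.getD_modify_of_ne d 0 (· + 1) h, ih]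
      ring

theorem pv_foldl_step (l : List Int) (d : PySem.Dict Int Int) (acc : Int) :
    (l.foldl pvStep (d, PySem.Int.mod acc (10 ^ 9 + 7))).2
      = PySem.Int.mod (acc + (l.map (fun k => d.getD k 0)).sum + pvQ l) (10 ^ 9 + 7) := by
  induction l generalizing d acc with
  | nil => simp [pvQ]
  | cons x t ih =>
    have hmod : ∀ a b : Int,
        PySem.Int.mod (PySem.Int.mod a (10 ^ 9 + 7) + b) (10 ^ 9 + 7)
          = PySem.Int.mod (a + b) (10 ^ 9 + 7) := by
      intro a b
      rw [PySem.Int.mod_eq_emod_of_pos (by norm_num),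
          PySem.Int.mod_eq_emod_of_pos (by norm_num),
          PySem.Int.mod_eq_emod_of_pos (by norm_num)]
      omega
    have hstep : pvStep (d, PySem.Int.mod acc (10 ^ 9 + 7)) x
        = (d.modify x 0 (· + 1), PySem.Int.mod (acc + d.getD x 0) (10 ^ 9 + 7)) := by
      simp [pvStep]
    rw [List.foldl_cons, hstep, ih]
    rw [pv_sum_getD_modify]
    simp [pvQ]
    ring_nf

-- pvQ grows by the count of the appended element.
theorem pvQ_append_singleton (t : List Int) (x : Int) :
    pvQ (t ++ [x]) = pvQ t + (t.count x : Int) := by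
  induction t with
  | nil => simp [pvQ]
  | cons y t ih =>
    simp only [List.cons_append, pvQ, ih, List.count_append, List.count_cons, List.count_nil]
    by_cases h : x = y
    · subst h; simp; ring
    · have h' : ¬ (y = x) := fun hy => h hy.symm
      simp [h, h']
      ring

-- changing a map at a single member of a Nodup list changes the sum by the difference there
theorem pv_sum_update_one (s : List Int) (x : Int) (f g : Int → Int)
    (hnd : s.Nodup) (hx : x ∈ s) (hfg : ∀ k ∈ s, k ≠ x → g k = f k) :
    (s.map g).sum = (s.map f).sum + (g x - f x) := by
  induction s with
  | nil => simp at hx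
  | cons y t ih =>
    rcases List.mem_cons.mp hx with h | h
    · subst h
      have : ∀ k ∈ t, g k = f k := by
        intro k hk
        exact hfg k (List.mem_cons_of_mem _ hk) (fun he => (List.nodup_cons.mp hnd).1 (he ▸ hk))
      have ht : (t.map g).sum = (t.map f).sum := by
        have : t.map g = t.map f := List.map_congr_left this
        rw [this]
      simp [ht]; ring
    · have hyx : y ≠ x := fun he => (List.nodup_cons.mp hnd).1 (he ▸ h)
      have hy : g y = f y := hfg y (List.mem_cons_self) hyx
      have := ih (List.nodup_cons.mp hnd).2 h
        (fun k hk hkx => hfg k (List.mem_cons_of_mem _ hk) hkx)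
      simp [hy, this]; ring

-- the triangular-number step: C(c+1) = C(c) + c
theorem pv_tri_step (c : Int) :
    PySem.Int.floordiv ((c + 1) * c) 2 = PySem.Int.floordiv (c * (c - 1)) 2 + c := by
  rw [PySem.Int.floordiv_eq_ediv_of_pos (by norm_num),
      PySem.Int.floordiv_eq_ediv_of_pos (by norm_num)]
  have h : (c + 1) * c = c * (c - 1) + c * 2 := by ring
  rw [h, Int.add_mul_ediv_right _ _ (by norm_num : (2:Int) ≠ 0)]

-- B's grouped sum over counter values equals pvQ
theorem pv_counter_sum (l : List Int) :
    (((PySem.Dict.counter l : PySem.Dict Int Int).values.map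
        (fun c => PySem.Int.floordiv (c * (c - 1)) 2)).sum) = pvQ l := by
  have hv : ∀ (m : List Int),
      ((PySem.Dict.counter m : PySem.Dict Int Int).values.map
        (fun c => PySem.Int.floordiv (c * (c - 1)) 2))
      = (PySem.Set.ofList m).map
          (fun k => PySem.Int.floordiv ((m.count k : Int) * ((m.count k : Int) - 1)) 2) := by
    intro m
    show (((PySem.Dict.counter m : PySem.Dict Int Int).items.map (·.2)).map _) = _
    rw [PySem.Dict.items_counter, List.map_map, List.map_map]
    rfl
  induction l using List.reverseRecOn with
  | nil => simp [pvQ, PySem.Dict.counter, PySem.Dict.values, PySem.Dict.empty]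
  | append_singleton t x ih =>
    rw [hv] at ih ⊢
    have hc : ∀ k : Int, ((t ++ [x]).count k : Int)
        = (t.count k : Int) + (if k = x then 1 else 0) := by
      intro k
      rw [List.count_append, List.count_singleton]
      by_cases h : k = x
      · subst h; simp
      · have hxk : ¬ x = k := fun hh => h hh.symm
        simp [h, hxk]
    have hset : PySem.Set.ofList (t ++ [x]) = PySem.Set.add (PySem.Set.ofList t) x := by
      simp [PySem.Set.ofList_eq_foldl, List.foldl_append]
    rw [hset, pvQ_append_singleton]
    by_cases hx : x ∈ t
    · have hmem : x ∈ PySem.Set.ofList t := (PySem.Set.mem_ofList t x).mpr hx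
      have hadd : PySem.Set.add (PySem.Set.ofList t) x = PySem.Set.ofList t := by
        simp [PySem.Set.add, PySem.Set.contains, hmem]
      rw [hadd]
      rw [pv_sum_update_one (PySem.Set.ofList t) x
        (fun k => PySem.Int.floordiv ((t.count k : Int) * ((t.count k : Int) - 1)) 2)
        (fun k => PySem.Int.floordiv (((t ++ [x]).count k : Int) * (((t ++ [x]).count k : Int) - 1)) 2)
        (PySem.Set.nodup_ofList t) hmem
        (by intro k hk hkx; beta_reduce; rw [hc k]; simp [hkx])]
      rw [ih, hc x]
      simp only [if_true]
      have harg : ((t.count x : Int) + 1) * (((t.count x : Int) + 1) - 1)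
          = ((t.count x : Int) + 1) * (t.count x : Int) := by ring
      rw [harg, pv_tri_step ((t.count x : Int))]
      ring
    · have hmem : x ∉ PySem.Set.ofList t := fun h => hx ((PySem.Set.mem_ofList t x).mp h)
      have hadd : PySem.Set.add (PySem.Set.ofList t) x = PySem.Set.ofList t ++ [x] := by
        simp [PySem.Set.add, PySem.Set.contains, hmem]
      rw [hadd, List.map_append, List.sum_append]
      have hmap : (PySem.Set.ofList t).map
            (fun k => PySem.Int.floordiv (((t ++ [x]).count k : Int) * (((t ++ [x]).count k : Int) - 1)) 2)
          = (PySem.Set.ofList t).map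
            (fun k => PySem.Int.floordiv ((t.count k : Int) * ((t.count k : Int) - 1)) 2) := by
        apply List.map_congr_left
        intro k hk
        have hkx : k ≠ x := fun he => hx (he ▸ (PySem.Set.mem_ofList t k).mp hk)
        rw [hc k]
        simp [hkx]
      rw [hmap, ih]
      have hx0 : (t.count x : Int) = 0 := by
        simp [List.count_eq_zero_of_not_mem hx]
      simp only [List.map_cons, List.map_nil, List.sum_cons, List.sum_nil]
      rw [hc x]
      simp only [if_true, hx0]
      norm_num [PySem.Int.floordiv_eq_ediv_of_pos (show (0:Int) < 2 by norm_num)]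

-- ===== VERDICT (by name: the statement is the Claim_ definition above) =====
theorem countNicePairs_spec : Claim_equal_countNicePairs := by
  intro nums _ _
  unfold Spec_countNicePairs countNicePairs countNicePairs_alt
  rw [show (nums.foldl
      (fun (s : PySem.Dict Int Int × Int) num =>
        let diff := num - pyRev num
        (s.1.modify diff 0 (· + 1),
         PySem.Int.mod (s.2 + s.1.getD diff 0) (10 ^ 9 + 7)))
      (PySem.Dict.empty, 0))
    = ((nums.map (fun num => num - pyRev num)).foldl pvStep
        (PySem.Dict.empty, PySem.Int.mod 0 (10 ^ 9 + 7))) by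
      rw [List.foldl_map]
      rfl]
  rw [pv_foldl_step]
  simp only [pv_counter_sum]
  simp [PySem.Dict.getD_empty, Function.comp_def]
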